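-- pv_equiv track=rewrite | github.com/mj-weshh/case-sensitive-letter-count-codility-test-solution | letters.py | solution
-- ===== SOURCE A (Python) =====
-- def solution(letters):
--     seen_lowercase_letters = set()
--     seen_uppercase_letters = set()
--     count = 0
--
--     for letter in letters:
--         if letter.islower():
--             seen_lowercase_letters.add(letter)
--
--         elif letter.isupper():
--             if letter not in seen_uppercase_letters and letter.lower() in seen_lowercase_letters:
--                 count += 1
--                 seen_uppercase_letters.add(letter)
--             elif letter in seen_uppercase_letters:
--                 continue
--             else:
--                 seen_uppercase_letters.add(letter)
--     return count
-- ===== SOURCE B (Python) =====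
-- def solution(letters):
--     first_lower = {}
--     first_upper = {}
--     for i, letter in enumerate(letters):
--         if letter.islower():
--             if letter not in first_lower:
--                 first_lower[letter] = i
--         elif letter.isupper():
--             if letter not in first_upper:
--                 first_upper[letter] = i
--     count = 0
--     for up, j in first_upper.items():
--         low = up.lower()
--         if low in first_lower and first_lower[low] < j:
--             count += 1
--     return count
-- ===== Notes on version B (the rewrite author's own statement) =====
-- stated objective: alternative
-- what changed: Replaces A's online two-set accumulation with an offline strategy: one pass records the first-occurrence index of every lowercase and uppercase letter in two dicts, then a second loop counts the uppercase letters whose lowercase first index is strictly smaller.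
import Mathlib
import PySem

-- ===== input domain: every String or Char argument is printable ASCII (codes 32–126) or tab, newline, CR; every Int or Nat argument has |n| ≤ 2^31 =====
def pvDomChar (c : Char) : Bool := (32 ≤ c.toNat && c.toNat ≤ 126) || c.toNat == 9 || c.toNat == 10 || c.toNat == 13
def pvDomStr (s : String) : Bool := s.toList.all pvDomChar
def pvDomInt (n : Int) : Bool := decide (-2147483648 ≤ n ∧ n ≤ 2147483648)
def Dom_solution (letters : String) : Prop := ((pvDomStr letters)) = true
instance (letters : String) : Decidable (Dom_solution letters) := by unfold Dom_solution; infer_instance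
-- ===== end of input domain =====

-- B replaces A's online two-set scan by first-occurrence index tables built in one pass
-- and compared in a second loop (alternative decomposition, same cost).


-- ===== PORT A =====
def solutionStepA (st : PySem.Set Char × PySem.Set Char × Int) (letter : Char) :
    PySem.Set Char × PySem.Set Char × Int :=
  let (sl, su, count) := st
  if PySem.Chars.islower letter then
    (PySem.Set.add sl letter, su, count)
  else if PySem.Chars.isupper letter then
    if !(PySem.Set.contains su letter) && PySem.Set.contains sl (PySem.Chars.lowerChar letter) then
      (sl, PySem.Set.add su letter, count + 1)
    else if PySem.Set.contains su letter then
      (sl, su, count)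
    else
      (sl, PySem.Set.add su letter, count)
  else (sl, su, count)

def solution (letters : String) : Int :=
  (letters.toList.foldl solutionStepA (PySem.Set.empty, PySem.Set.empty, 0)).2.2

-- ===== PORT B =====
def solutionAltPass (st : PySem.Dict Char Int × PySem.Dict Char Int) (p : Int × Char) :
    PySem.Dict Char Int × PySem.Dict Char Int :=
  let (fl, fu) := st
  let (i, letter) := p
  if PySem.Chars.islower letter then
    (if fl.contains letter then fl else fl.insert letter i, fu)
  else if PySem.Chars.isupper letter then
    (fl, if fu.contains letter then fu else fu.insert letter i)
  else (fl, fu)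

def solutionAltCount (fl : PySem.Dict Char Int) (items : List (Char × Int)) : Int :=
  items.foldl (fun count p =>
    match fl.get? (PySem.Chars.lowerChar p.1) with
    | some k => if k < p.2 then count + 1 else count
    | none => count) 0

def solution_alt (letters : String) : Int :=
  let st := (PySem.List.enumerate letters.toList 0).foldl solutionAltPass
      (PySem.Dict.empty, PySem.Dict.empty)
  solutionAltCount st.1 st.2.items

-- ===== PRECONDITION & SPEC =====
def Spec_solution (letters : String) (out : Int) : Prop := out = solution_alt letters
instance (letters : String) (out : Int) : Decidable (Spec_solution letters out) := by unfold Spec_solution; infer_instance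

-- ===== CLAIM (what is proved, stated in full; the proofs are below) =====
def Claim_equal_solution : Prop := ∀ (letters : String), Dom_solution letters → Spec_solution letters (solution letters)

-- ===== LEMMAS AND PROOFS =====

-- inserting a fresh lowercase key with an index no smaller than every recorded upper index
-- does not change the count
lemma countLowerInsert (fl : PySem.Dict Char Int) (ch : Char) (n : Int)
    (items : List (Char × Int))
    (hch : ch ∉ fl.keys) (hv : ∀ p ∈ items, p.2 < n) :
    solutionAltCount (fl.insert ch n) items = solutionAltCount fl items := by
  unfold solutionAltCount
  apply PySem.List.foldl_congr_mem
  intro c p hp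
  rw [PySem.Dict.get?_insert]
  by_cases h : PySem.Chars.lowerChar p.1 = ch
  · have hnone : fl.get? ch = none := (PySem.Dict.get?_eq_none_iff_not_mem_keys fl ch).2 hch
    have hlt := hv p hp
    have hnlt : ¬ (n < p.2) := by omega
    simp [h, hnone, hnlt]
  · simp [h]

-- appending one item to the counted list adds its contribution
lemma countAppend (fl : PySem.Dict Char Int) (items : List (Char × Int)) (p : Char × Int) :
    solutionAltCount fl (items ++ [p]) =
      (match fl.get? (PySem.Chars.lowerChar p.1) with
        | some k => if k < p.2 then solutionAltCount fl items + 1 else solutionAltCount fl items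
        | none => solutionAltCount fl items) := by
  unfold solutionAltCount
  rw [List.foldl_append]
  rfl

lemma mainInv (rest : List Char) (n : Int) (sl su : PySem.Set Char) (c : Int)
    (fl fu : PySem.Dict Char Int)
    (hkl : fl.keys = sl) (hku : fu.keys = su)
    (hvl : ∀ p ∈ fl.items, p.2 < n)
    (hvu : ∀ p ∈ fu.items, p.2 < n)
    (hc : c = solutionAltCount fl fu.items) :
    (rest.foldl solutionStepA (sl, su, c)).2.2 =
      (let st := (PySem.List.enumerate rest n).foldl solutionAltPass (fl, fu)
       solutionAltCount st.1 st.2.items) := by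
  subst hkl hku
  induction rest generalizing n c fl fu with
  | nil => simpa [PySem.List.enumerate_nil] using hc
  | cons ch rest ih =>
    rw [PySem.List.enumerate_cons, List.foldl_cons, List.foldl_cons]
    by_cases hl : PySem.Chars.islower ch
    · cases hm : fl.contains ch with
      | true =>
        have hmem : ch ∈ fl.keys := (PySem.Dict.contains_iff_mem_keys fl ch).1 hm
        rw [show solutionStepA (fl.keys, fu.keys, c) ch = (fl.keys, fu.keys, c) by
              simp [solutionStepA, hl, PySem.Set.add_of_mem hmem],
            show solutionAltPass (fl, fu) (n, ch) = (fl, fu) by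
              simp [solutionAltPass, hl, hm]]
        exact ih (n + 1) c fl fu (fun p hp => by have := hvl p hp; omega)
          (fun p hp => by have := hvu p hp; omega) hc
      | false =>
        have hnot : ch ∉ fl.keys := fun h =>
          by rw [(PySem.Dict.contains_iff_mem_keys fl ch).2 h] at hm; exact absurd hm (by simp)
        rw [show solutionStepA (fl.keys, fu.keys, c) ch =
              ((fl.insert ch n).keys, fu.keys, c) by
              simp [solutionStepA, hl, PySem.Set.add_of_not_mem hnot,
                PySem.Dict.keys_insert_of_not_contains fl n hm],
            show solutionAltPass (fl, fu) (n, ch) = (fl.insert ch n, fu) by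
              simp [solutionAltPass, hl, hm]]
        refine ih (n + 1) c (fl.insert ch n) fu ?_
          (fun p hp => by have := hvu p hp; omega) ?_
        · intro p hp
          rw [PySem.Dict.items_insert_of_not_contains fl n hm] at hp
          rcases List.mem_append.1 hp with h | h
          · have := hvl p h; omega
          · rw [List.mem_singleton] at h; subst h; show n < n + 1; omega
        · rw [countLowerInsert fl ch n fu.items hnot hvu]; exact hc
    · by_cases hu : PySem.Chars.isupper ch
      · cases hub : fu.contains ch with
        | true =>
          have hmem : ch ∈ fu.keys := (PySem.Dict.contains_iff_mem_keys fu ch).1 hub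
          have hcs : PySem.Set.contains fu.keys ch = true :=
            (PySem.Set.contains_iff fu.keys ch).2 hmem
          rw [show solutionStepA (fl.keys, fu.keys, c) ch = (fl.keys, fu.keys, c) by
                simp [solutionStepA, hl, hu, hmem],
              show solutionAltPass (fl, fu) (n, ch) = (fl, fu) by
                simp [solutionAltPass, hl, hu, hub]]
          exact ih (n + 1) c fl fu (fun p hp => by have := hvl p hp; omega)
            (fun p hp => by have := hvu p hp; omega) hc
        | false =>
          have hnot : ch ∉ fu.keys := fun h =>
            by rw [(PySem.Dict.contains_iff_mem_keys fu ch).2 h] at hub; exact absurd hub (by simp)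
          have hcs : PySem.Set.contains fu.keys ch = false := by
            cases hx : PySem.Set.contains fu.keys ch with
            | false => rfl
            | true => exact absurd ((PySem.Set.contains_iff fu.keys ch).1 hx) hnot
          have hBstep : solutionAltPass (fl, fu) (n, ch) = (fl, fu.insert ch n) := by
            simp [solutionAltPass, hl, hu, hub]
          have hkeys : (fu.insert ch n).keys = PySem.Set.add fu.keys ch := by
            rw [PySem.Dict.keys_insert_of_not_contains fu n hub,
              PySem.Set.add_of_not_mem hnot]
          have hvu' : ∀ p ∈ (fu.insert ch n).items, p.2 < n + 1 := by
            intro p hp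
            rw [PySem.Dict.items_insert_of_not_contains fu n hub] at hp
            rcases List.mem_append.1 hp with h | h
            · have := hvu p h; omega
            · rw [List.mem_singleton] at h; subst h; show n < n + 1; omega
          have hcnt : solutionAltCount fl (fu.insert ch n).items =
              (match fl.get? (PySem.Chars.lowerChar ch) with
                | some k => if k < n then solutionAltCount fl fu.items + 1
                    else solutionAltCount fl fu.items
                | none => solutionAltCount fl fu.items) := by
            rw [PySem.Dict.items_insert_of_not_contains fu n hub,
              countAppend fl fu.items (ch, n)]
          cases hlow : PySem.Set.contains fl.keys (PySem.Chars.lowerChar ch) with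
          | true =>
            have hlmem : PySem.Chars.lowerChar ch ∈ fl.keys :=
              (PySem.Set.contains_iff fl.keys (PySem.Chars.lowerChar ch)).1 hlow
            rw [show solutionStepA (fl.keys, fu.keys, c) ch =
                  (fl.keys, PySem.Set.add fu.keys ch, c + 1) by
                simp [solutionStepA, hl, hu, hnot, hlmem], hBstep, ← hkeys]
            cases hg : fl.get? (PySem.Chars.lowerChar ch) with
            | none =>
              exact absurd ((PySem.Dict.get?_eq_none_iff_not_mem_keys fl
                (PySem.Chars.lowerChar ch)).1 hg) (by simpa using hlmem)
            | some k =>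
              have hkn : k < n :=
                hvl _ (PySem.Dict.mem_items_of_get?_eq_some fl hg)
              refine ih (n + 1) (c + 1) fl (fu.insert ch n)
                (fun p hp => by have := hvl p hp; omega) hvu' ?_
              rw [hcnt, hg]
              simp [hkn, hc]
          | false =>
            have hlnot : PySem.Chars.lowerChar ch ∉ fl.keys := fun h =>
              by rw [(PySem.Set.contains_iff fl.keys (PySem.Chars.lowerChar ch)).2 h] at hlow
                 exact absurd hlow (by simp)
            have hg : fl.get? (PySem.Chars.lowerChar ch) = none :=
              (PySem.Dict.get?_eq_none_iff_not_mem_keys fl (PySem.Chars.lowerChar ch)).2 hlnot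
            rw [show solutionStepA (fl.keys, fu.keys, c) ch =
                  (fl.keys, PySem.Set.add fu.keys ch, c) by
                simp [solutionStepA, hl, hu, hnot, hlnot], hBstep, ← hkeys]
            refine ih (n + 1) c fl (fu.insert ch n)
              (fun p hp => by have := hvl p hp; omega) hvu' ?_
            rw [hcnt, hg]; exact hc
      · rw [show solutionStepA (fl.keys, fu.keys, c) ch = (fl.keys, fu.keys, c) by
              simp [solutionStepA, hl, hu],
            show solutionAltPass (fl, fu) (n, ch) = (fl, fu) by
              simp [solutionAltPass, hl, hu]]
        exact ih (n + 1) c fl fu (fun p hp => by have := hvl p hp; omega)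
          (fun p hp => by have := hvu p hp; omega) hc

-- ===== VERDICT (by name: the statement is the Claim_ definition above) =====
theorem solution_spec : Claim_equal_solution := by
  intro letters _
  unfold Spec_solution solution solution_alt
  exact mainInv letters.toList 0 PySem.Set.empty PySem.Set.empty 0 PySem.Dict.empty PySem.Dict.empty rfl rfl (by simp [PySem.Dict.empty]) (by simp [PySem.Dict.empty]) rfl
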